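-- pv_equiv track=rewrite | github.com/daochenw/rl-stabilizer | DaochenStabilizerFiles/Wagner/utils_quadform.py | number_to_padbase2
-- ===== SOURCE A (Python) =====
-- def number_to_padbase2(n, k):
--     if n == 0:
--         return [0]*k
--     digits = []
--     while n:
--         digits.append(int(n % 2))
--         n //= 2
--     nopad = digits[::-1]
--     return [0]*(k-len(nopad))+nopad
-- ===== SOURCE B (Python) =====
-- def number_to_padbase2(n, k):
--     s = format(n, 'b').zfill(k)
--     return [int(c) for c in s]
-- ===== Notes on version B (the rewrite author's own statement) =====
-- stated objective: idiomatic
-- what changed: Replaces the manual divmod loop, list reversal and pad arithmetic with format(n,'b').zfill(k) and a digit comprehension.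
-- intended difference: For n==0 with k<=0, A's special case returns the empty list while B returns [0], the one-digit binary representation of 0, consistent with A's own behaviour for nonzero n (at least one digit, never truncated). — e.g. on number_to_padbase2(0, 0): A returns [], B returns [0]
import Mathlib
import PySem

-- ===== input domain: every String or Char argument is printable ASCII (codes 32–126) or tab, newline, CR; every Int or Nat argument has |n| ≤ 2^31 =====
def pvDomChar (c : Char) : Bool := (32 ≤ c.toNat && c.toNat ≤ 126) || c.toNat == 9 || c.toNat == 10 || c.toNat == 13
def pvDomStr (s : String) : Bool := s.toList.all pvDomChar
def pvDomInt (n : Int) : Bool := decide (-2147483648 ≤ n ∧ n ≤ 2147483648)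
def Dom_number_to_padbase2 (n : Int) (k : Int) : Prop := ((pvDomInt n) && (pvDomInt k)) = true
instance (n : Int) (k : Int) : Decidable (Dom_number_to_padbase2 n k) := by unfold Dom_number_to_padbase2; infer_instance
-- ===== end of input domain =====

-- B replaces A's manual divmod loop, reversal and pad arithmetic with the idiomatic
-- format(n,'b').zfill(k) digit-string construction; for n==0, k<=0 B returns [0] where A returns [].


-- ===== PORT A =====
-- 'while n: digits.append(int(n % 2)); n //= 2'   — the fuel argument (n.toNat at the call
-- site) only totalizes the loop; it never runs out while 0 < n, and Python diverges for n < 0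
-- (excluded by Pre_ below), where fuel exhaustion is harmless.
def pvLoopA : Nat → Int → List Int → List Int
  | 0, _, digits => digits
  | fuel + 1, n, digits =>
    if 0 < n then pvLoopA fuel (PySem.Int.floordiv n 2) (digits ++ [PySem.Int.mod n 2])
    else digits

def number_to_padbase2 (n : Int) (k : Int) : List Int :=
  if n = 0 then List.replicate k.toNat 0
  else
    let digits := pvLoopA n.toNat n []
    let nopad := digits.reverse          -- digits[::-1]
    List.replicate (k - (nopad.length : Int)).toNat 0 ++ nopad

-- ===== PORT B =====
-- format(n,'b') for n ≥ 0: most-significant-bit-first digit list (already as ints);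
-- the fuel parameter only totalizes the recursion (n.toNat always suffices for n ≥ 0).
def pvBitsAux : Nat → Int → List Int
  | 0, n => [n]
  | fuel + 1, n =>
    if n < 2 then [n]
    else pvBitsAux fuel (PySem.Int.floordiv n 2) ++ [PySem.Int.mod n 2]

def number_to_padbase2_alt (n : Int) (k : Int) : List Int :=
  let s := pvBitsAux n.toNat n                 -- format(n, 'b')
  List.replicate (k.toNat - s.length) 0 ++ s   -- .zfill(k), then [int(c) for c in s]

-- ===== PRECONDITION & SPEC =====
-- Pre_ excludes negative n, on which A's while-loop never terminates (Python diverges).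
def Pre_number_to_padbase2 (n : Int) (k : Int) : Prop := 0 ≤ n
instance (n : Int) (k : Int) : Decidable (Pre_number_to_padbase2 n k) := by unfold Pre_number_to_padbase2; infer_instance
def pvWitness_number_to_padbase2 : Int × Int := (6, 4)

-- For n==0 with k<=0, A's special case returns the empty list while B returns [0], the
-- one-digit binary representation of 0, consistent with A's own behaviour for nonzero n.
def D_number_to_padbase2 (n : Int) (k : Int) : Prop := n = 0 ∧ k ≤ 0
instance (n : Int) (k : Int) : Decidable (D_number_to_padbase2 n k) := by unfold D_number_to_padbase2; infer_instance

def Spec_number_to_padbase2 (n : Int) (k : Int) (out : List Int) : Prop :=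
  ¬ D_number_to_padbase2 n k → out = number_to_padbase2_alt n k
instance (n : Int) (k : Int) (out : List Int) : Decidable (Spec_number_to_padbase2 n k out) := by unfold Spec_number_to_padbase2; infer_instance

def pvDiffWitness_number_to_padbase2 : Int × Int := (0, 0)
def pvDiffWitnessOut_number_to_padbase2 : (List Int) × (List Int) := ([], [0])

-- ===== CLAIM (what is proved, stated in full; the proofs are below) =====
def Claim_unchanged_number_to_padbase2 : Prop := ∀ (n : Int) (k : Int), Dom_number_to_padbase2 n k → Pre_number_to_padbase2 n k → Spec_number_to_padbase2 n k (number_to_padbase2 n k)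
def Claim_changed_number_to_padbase2 : Prop := Dom_number_to_padbase2 (pvDiffWitness_number_to_padbase2.1) (pvDiffWitness_number_to_padbase2.2) ∧ Pre_number_to_padbase2 (pvDiffWitness_number_to_padbase2.1) (pvDiffWitness_number_to_padbase2.2) ∧ D_number_to_padbase2 (pvDiffWitness_number_to_padbase2.1) (pvDiffWitness_number_to_padbase2.2) ∧ number_to_padbase2 (pvDiffWitness_number_to_padbase2.1) (pvDiffWitness_number_to_padbase2.2) = pvDiffWitnessOut_number_to_padbase2.1 ∧ number_to_padbase2_alt (pvDiffWitness_number_to_padbase2.1) (pvDiffWitness_number_to_padbase2.2) = pvDiffWitnessOut_number_to_padbase2.2 ∧ pvDiffWitnessOut_number_to_padbase2.1 ≠ pvDiffWitnessOut_number_to_padbase2.2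
def Claim_exact_number_to_padbase2 : Prop := ∀ (n : Int) (k : Int), Dom_number_to_padbase2 n k → Pre_number_to_padbase2 n k → D_number_to_padbase2 n k → number_to_padbase2 n k ≠ number_to_padbase2_alt n k

-- ===== LEMMAS AND PROOFS =====

theorem pvLoopA_nonpos (fuel : Nat) (n : Int) (digits : List Int) (h : n ≤ 0) :
    pvLoopA fuel n digits = digits := by
  cases fuel with
  | zero => rfl
  | succ f => rw [pvLoopA, if_neg (by omega)]

-- pvBitsAux does not depend on the fuel once it covers n (for 0 ≤ n).
theorem pvBitsAux_fuel_irrel (f : Nat) : ∀ (g : Nat) (n : Int), 0 ≤ n → n.toNat ≤ f → n.toNat ≤ g →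
    pvBitsAux f n = pvBitsAux g n := by
  induction f with
  | zero =>
    intro g n hn hf _
    have h0 : n = 0 := by omega
    subst h0
    cases g with
    | zero => rfl
    | succ g' => rw [pvBitsAux, pvBitsAux, if_pos (by omega)]
  | succ f' ih =>
    intro g n hn hf hg
    by_cases h2 : n < 2
    · cases g with
      | zero =>
        have h0 : n = 0 := by omega
        subst h0
        rw [pvBitsAux, pvBitsAux, if_pos (by omega)]
      | succ g' => rw [pvBitsAux, pvBitsAux, if_pos h2, if_pos h2]
    · have hg2 : 2 ≤ g := by omega
      obtain ⟨g', rfl⟩ : ∃ g'', g = g'' + 1 := ⟨g - 1, by omega⟩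
      rw [pvBitsAux, pvBitsAux, if_neg h2, if_neg h2,
        PySem.Int.floordiv_eq_ediv_of_pos (show (0:Int) < 2 by omega)]
      rw [ih g' (n / 2) (by omega) (by omega) (by omega)]

-- A's loop accumulates exactly the bits of n, least-significant first.
theorem pvLoopA_eq_bits (fuel : Nat) : ∀ (n : Int) (digits : List Int), 0 < n → n.toNat ≤ fuel →
    pvLoopA fuel n digits = digits ++ (pvBitsAux n.toNat n).reverse := by
  induction fuel with
  | zero => intro n digits hn hf; omega
  | succ f ih =>
    intro n digits hn hf
    rw [pvLoopA, if_pos hn]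
    by_cases h2 : n < 2
    · have h1 : n = 1 := by omega
      subst h1
      rw [pvLoopA_nonpos f _ _ (by
        rw [PySem.Int.floordiv_eq_ediv_of_pos (show (0:Int) < 2 by omega)]; decide)]
      simp [PySem.Int.mod, pvBitsAux]
    · have hd : PySem.Int.floordiv n 2 = n / 2 :=
        PySem.Int.floordiv_eq_ediv_of_pos (show (0:Int) < 2 by omega)
      have hq : 0 < PySem.Int.floordiv n 2 := by rw [hd]; omega
      rw [ih _ _ hq (by rw [hd]; omega)]
      obtain ⟨m, hm⟩ : ∃ m, n.toNat = m + 1 := ⟨n.toNat - 1, by omega⟩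
      rw [hm, pvBitsAux, if_neg h2]
      rw [pvBitsAux_fuel_irrel m (PySem.Int.floordiv n 2).toNat (PySem.Int.floordiv n 2)
        (by rw [hd]; omega) (by rw [hd]; omega) (le_refl _)]
      simp

theorem number_to_padbase2_spec_aux (n k : Int) (hn : 0 ≤ n) (hD : ¬ D_number_to_padbase2 n k) :
    number_to_padbase2 n k = number_to_padbase2_alt n k := by
  by_cases h0 : n = 0
  · subst h0
    have hk : 0 < k := by
      by_contra hk
      exact hD ⟨rfl, by omega⟩
    rw [number_to_padbase2, if_pos rfl, number_to_padbase2_alt]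
    simp only [Int.toNat_zero, pvBitsAux, List.length_cons, List.length_nil]
    have hkk : k.toNat = (k.toNat - 1) + 1 := by omega
    rw [hkk, List.replicate_succ']
    simp
  · have hn' : 0 < n := by omega
    rw [number_to_padbase2, if_neg h0, number_to_padbase2_alt]
    simp only
    rw [pvLoopA_eq_bits n.toNat n [] hn' (le_refl _), List.nil_append, List.reverse_reverse]
    congr 1
    congr 1
    omega

-- ===== VERDICT =====
theorem number_to_padbase2_spec : Claim_unchanged_number_to_padbase2 := by
  intro n k _ hpre hD
  exact number_to_padbase2_spec_aux n k hpre hD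

theorem number_to_padbase2_changed : Claim_changed_number_to_padbase2 := by
  unfold Claim_changed_number_to_padbase2; decide

theorem number_to_padbase2_tight : Claim_exact_number_to_padbase2 := by
  intro n k _ _ hD
  obtain ⟨h0, hk⟩ := hD
  subst h0
  rw [number_to_padbase2, if_pos rfl, number_to_padbase2_alt]
  simp only [Int.toNat_zero, pvBitsAux]
  have : k.toNat = 0 := by omega
  rw [this]
  simp
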